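-- pv_equiv track=rewrite | github.com/mims-harvard/GraphXAI | graphxai/gnn_ex_eval/GraphMask/code/problems/star_graphs/star_graph_problem.py | score_attributions
-- ===== SOURCE A (Python) =====
-- def score_attributions(attribution, example):
--     tp = 0
--     fp = 0
--     fn = 0
--
--     attribution_labels = example[4]
--     for i in range(len(attribution)):
--         if attribution[i] == attribution_labels[i] and attribution_labels[i] == 1:
--             tp += 1
--         elif attribution[i] != attribution_labels[i] and attribution_labels[i] == 0:
--             fp += 1
--         elif attribution[i] != attribution_labels[i] and attribution_labels[i] == 1:
--             fn += 1
--
--     return tp, fp, fn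
-- ===== SOURCE B (Python) =====
-- def score_attributions(attribution, example):
--     labels = example[4]
--     freq = {}
--     for i in range(len(attribution)):
--         key = (attribution[i], labels[i])
--         freq[key] = freq.get(key, 0) + 1
--     tp = freq.get((1, 1), 0)
--     fp = sum(c for (a, l), c in freq.items() if l == 0 and a != 0)
--     fn = sum(c for (a, l), c in freq.items() if l == 1 and a != 1)
--     return tp, fp, fn
-- ===== Notes on version B (the rewrite author's own statement) =====
-- stated objective: alternative
-- what changed: B tabulates a contingency table (a frequency dict keyed by the pair (attribution[i], label[i])) in one pass, then reads TP off the (1,1) cell and sums FP/FN cells over the table, instead of A's per-element three-way branch with three running counters.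
import Mathlib
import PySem

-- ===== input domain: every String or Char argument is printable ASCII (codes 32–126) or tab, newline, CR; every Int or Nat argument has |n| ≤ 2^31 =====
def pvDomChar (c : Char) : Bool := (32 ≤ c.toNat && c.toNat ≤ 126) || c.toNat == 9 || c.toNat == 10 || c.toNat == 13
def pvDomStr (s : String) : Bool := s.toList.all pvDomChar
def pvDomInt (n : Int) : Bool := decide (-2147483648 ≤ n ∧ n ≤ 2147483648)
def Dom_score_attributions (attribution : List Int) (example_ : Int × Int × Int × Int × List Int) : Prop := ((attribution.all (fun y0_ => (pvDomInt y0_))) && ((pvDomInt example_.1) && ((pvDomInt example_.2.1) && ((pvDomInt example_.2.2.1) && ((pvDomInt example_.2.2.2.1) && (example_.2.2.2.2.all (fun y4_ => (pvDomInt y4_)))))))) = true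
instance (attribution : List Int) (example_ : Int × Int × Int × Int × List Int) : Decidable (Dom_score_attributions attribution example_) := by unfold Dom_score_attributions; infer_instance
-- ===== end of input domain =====

-- B replaces A's per-element three-way branch over three counters by a contingency-table pass
-- (a frequency dict keyed by (attribution[i], label[i])) read off afterwards; same cost, different decomposition ("alternative").

-- ===== PORT A =====
-- the for-loop of A: three counters, branch chain; `none` from an index lookup = Python IndexError (outside Pre_)
def pvLoopA (attr labels : List Int) : List Int → Int × Int × Int → Int × Int × Int
  | [], s => s
  | i :: rest, (tp, fp, fn) =>
    match PySem.List.pyGet? attr i, PySem.List.pyGet? labels i with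
    | some a, some l =>
        if a = l ∧ l = 1 then pvLoopA attr labels rest (tp + 1, fp, fn)
        else if a ≠ l ∧ l = 0 then pvLoopA attr labels rest (tp, fp + 1, fn)
        else if a ≠ l ∧ l = 1 then pvLoopA attr labels rest (tp, fp, fn + 1)
        else pvLoopA attr labels rest (tp, fp, fn)
    | _, _ => (tp, fp, fn)

def score_attributions (attribution : List Int) (example_ : Int × Int × Int × Int × List Int) : Int × Int × Int :=
  pvLoopA attribution example_.2.2.2.2 (PySem.List.pyRange 0 attribution.length 1) (0, 0, 0)

-- ===== PORT B =====
-- the for-loop of B: freq[key] = freq.get(key, 0) + 1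
def pvBuildFreq (attr labels : List Int) : List Int → PySem.Dict (Int × Int) Int → PySem.Dict (Int × Int) Int
  | [], d => d
  | i :: rest, d =>
    match PySem.List.pyGet? attr i, PySem.List.pyGet? labels i with
    | some a, some l => pvBuildFreq attr labels rest (d.insert (a, l) (d.getD (a, l) 0 + 1))
    | _, _ => d

def score_attributions_alt (attribution : List Int) (example_ : Int × Int × Int × Int × List Int) : Int × Int × Int :=
  let labels := example_.2.2.2.2
  let freq := pvBuildFreq attribution labels (PySem.List.pyRange 0 attribution.length 1) PySem.Dict.empty
  let tp := freq.getD (1, 1) 0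
  let fp := ((freq.items.filter (fun q => q.1.2 == 0 && q.1.1 != 0)).map (·.2)).sum
  let fn := ((freq.items.filter (fun q => q.1.2 == 1 && q.1.1 != 1)).map (·.2)).sum
  (tp, fp, fn)

-- ===== PRECONDITION & SPEC =====
-- Pre_: A indexes example[4][i] for every i < len(attribution), so it raises IndexError when the label list is shorter.
def Pre_score_attributions (attribution : List Int) (example_ : Int × Int × Int × Int × List Int) : Prop :=
  attribution.length ≤ example_.2.2.2.2.length
instance (attribution : List Int) (example_ : Int × Int × Int × Int × List Int) : Decidable (Pre_score_attributions attribution example_) := by unfold Pre_score_attributions; infer_instance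
def pvWitness_score_attributions : List Int × (Int × Int × Int × Int × List Int) := ([1, 0, 2], (0, 0, 0, 0, [1, 1, 0]))

def Spec_score_attributions (attribution : List Int) (example_ : Int × Int × Int × Int × List Int) (out : Int × Int × Int) : Prop := out = score_attributions_alt attribution example_
instance (attribution : List Int) (example_ : Int × Int × Int × Int × List Int) (out : Int × Int × Int) : Decidable (Spec_score_attributions attribution example_ out) := by unfold Spec_score_attributions; infer_instance

-- ===== CLAIM (what is proved, stated in full; the proofs are below) =====
def Claim_equal_score_attributions : Prop := ∀ (attribution : List Int) (example_ : Int × Int × Int × Int × List Int), Dom_score_attributions attribution example_ → Pre_score_attributions attribution example_ → Spec_score_attributions attribution example_ (score_attributions attribution example_)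

-- ===== LEMMAS AND PROOFS =====

-- the pair read at index i (proof-side abbreviation; lookups succeed on all indices we use)
def pvPairAt (attr labels : List Int) (i : Int) : Int × Int :=
  (((PySem.List.pyGet? attr i).getD 0), ((PySem.List.pyGet? labels i).getD 0))

-- the three per-pair predicates, as A's branch chain tests them
def pvPTp (z : Int × Int) : Bool := z.1 == z.2 && z.2 == 1
def pvPFp (z : Int × Int) : Bool := z.1 != z.2 && z.2 == 0
def pvPFn (z : Int × Int) : Bool := z.1 != z.2 && z.2 == 1

lemma pvLoopA_counts (attr labels : List Int) :
    ∀ (idxs : List Int) (s : Int × Int × Int),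
      (∀ i ∈ idxs, (PySem.List.pyGet? attr i).isSome ∧ (PySem.List.pyGet? labels i).isSome) →
      pvLoopA attr labels idxs s =
        (s.1 + ((idxs.map (pvPairAt attr labels)).countP pvPTp : Int),
         s.2.1 + ((idxs.map (pvPairAt attr labels)).countP pvPFp : Int),
         s.2.2 + ((idxs.map (pvPairAt attr labels)).countP pvPFn : Int)) := by
  intro idxs
  induction idxs with
  | nil => intro s _; simp [pvLoopA]
  | cons i rest ih =>
    rintro ⟨tp, fp, fn⟩ h
    obtain ⟨ha, hl⟩ := h i (List.mem_cons_self ..)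
    obtain ⟨a, ha'⟩ := Option.isSome_iff_exists.mp ha
    obtain ⟨l, hl'⟩ := Option.isSome_iff_exists.mp hl
    have hrest : ∀ j ∈ rest, (PySem.List.pyGet? attr j).isSome ∧ (PySem.List.pyGet? labels j).isSome :=
      fun j hj => h j (List.mem_cons_of_mem _ hj)
    have hpair : pvPairAt attr labels i = (a, l) := by simp [pvPairAt, ha', hl']
    simp only [pvLoopA, ha', hl', List.map_cons, hpair]
    split_ifs with h1 h2 h3
    · -- tp branch: a = l and l = 1
      have e1 : pvPTp (a, l) = true := by simp [pvPTp, h1.1, h1.2]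
      have e2 : pvPFp (a, l) = false := by simp [pvPFp, h1.1]
      have e3 : pvPFn (a, l) = false := by simp [pvPFn, h1.1]
      rw [ih _ hrest]
      simp only [List.countP_cons, e1, e2, e3, if_true, Bool.false_eq_true, if_false, Prod.mk.injEq]
      refine ⟨by omega, by omega, by omega⟩
    · -- fp branch: a ≠ l and l = 0
      have h20 : a ≠ 0 := h2.2 ▸ h2.1
      have e1 : pvPTp (a, l) = false := by simp [pvPTp, h2.2]
      have e2 : pvPFp (a, l) = true := by simp [pvPFp, h2.2, h20]
      have e3 : pvPFn (a, l) = false := by simp [pvPFn, h2.2]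
      rw [ih _ hrest]
      simp only [List.countP_cons, e1, e2, e3, if_true, Bool.false_eq_true, if_false, Prod.mk.injEq]
      refine ⟨by omega, by omega, by omega⟩
    · -- fn branch: a ≠ l and l = 1
      have h31 : a ≠ 1 := h3.2 ▸ h3.1
      have e1 : pvPTp (a, l) = false := by simp [pvPTp, h3.2, h31]
      have e2 : pvPFp (a, l) = false := by simp [pvPFp, h3.2]
      have e3 : pvPFn (a, l) = true := by simp [pvPFn, h3.2, h31]
      rw [ih _ hrest]
      simp only [List.countP_cons, e1, e2, e3, if_true, Bool.false_eq_true, if_false, Prod.mk.injEq]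
      refine ⟨by omega, by omega, by omega⟩
    · -- no branch taken (true negatives and everything else)
      have e1 : pvPTp (a, l) = false := by
        rcases hb : pvPTp (a, l) with _ | _
        · rfl
        · exact absurd (by simpa [pvPTp] using hb) h1
      have e2 : pvPFp (a, l) = false := by
        rcases hb : pvPFp (a, l) with _ | _
        · rfl
        · exact absurd (by simpa [pvPFp] using hb) h2
      have e3 : pvPFn (a, l) = false := by
        rcases hb : pvPFn (a, l) with _ | _
        · rfl
        · exact absurd (by simpa [pvPFn] using hb) h3
      rw [ih _ hrest]
      simp only [List.countP_cons, e1, e2, e3, Bool.false_eq_true, if_false, Prod.mk.injEq]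
      refine ⟨by omega, by omega, by omega⟩

lemma pvBuildFreq_eq_counter (attr labels : List Int) :
    ∀ (idxs : List Int) (d : PySem.Dict (Int × Int) Int),
      (∀ i ∈ idxs, (PySem.List.pyGet? attr i).isSome ∧ (PySem.List.pyGet? labels i).isSome) →
      pvBuildFreq attr labels idxs d =
        (idxs.map (pvPairAt attr labels)).foldl (fun d z => d.insert z (d.getD z 0 + 1)) d := by
  intro idxs
  induction idxs with
  | nil => intro d _; simp [pvBuildFreq]
  | cons i rest ih =>
    intro d h
    obtain ⟨ha, hl⟩ := h i (List.mem_cons_self ..)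
    obtain ⟨a, ha'⟩ := Option.isSome_iff_exists.mp ha
    obtain ⟨l, hl'⟩ := Option.isSome_iff_exists.mp hl
    have hpair : pvPairAt attr labels i = (a, l) := by simp [pvPairAt, ha', hl']
    simp only [pvBuildFreq, ha', hl', List.map_cons, List.foldl_cons, hpair]
    exact ih _ (fun j hj => h j (List.mem_cons_of_mem _ hj))

-- summing the table's counts over the distinct keys satisfying p is countP p over the raw data
lemma pvSumCounts (zs : List (Int × Int)) (p : (Int × Int) → Bool) :
    (((PySem.Set.ofList zs).filter p).map (fun k => (zs.count k : Int))).sum = (zs.countP p : Int) := by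
  have hperm : List.Perm (PySem.Set.ofList zs) zs.dedup :=
    List.perm_of_nodup_nodup_toFinset_eq (PySem.Set.nodup_ofList zs) zs.nodup_dedup
      (by ext x; simp [PySem.Set.mem_ofList, List.mem_dedup])
  rw [List.Perm.sum_eq (List.Perm.map _ (List.Perm.filter p hperm))]
  -- bridge the BEq instance of List.count to the DecidableEq-derived one used by Mathlib's lemma
  have hcc : (fun k => ((zs.count k : Int))) = (fun k => ((@List.count _ instBEqOfDecidableEq k zs : Nat) : Int)) := by
    funext k
    congr 1
    show List.countP (fun x => x == k) zs = List.countP (fun x => @BEq.beq _ instBEqOfDecidableEq x k) zs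
    apply List.countP_congr
    intro x _
    by_cases h : x = k
    · subst h; simp
    · simp [h]
  rw [hcc, show (fun k => ((@List.count _ instBEqOfDecidableEq k zs : Nat) : Int)) = (fun n : Nat => (n : Int)) ∘ (fun k => @List.count _ instBEqOfDecidableEq k zs) from rfl]
  rw [← List.map_map, ← Nat.cast_list_sum, List.sum_map_count_dedup_filter_eq_countP]

lemma pvGetSome (xs : List Int) (i : Int) (h0 : 0 ≤ i) (h1 : i < xs.length) :
    (PySem.List.pyGet? xs i).isSome := by
  rw [Option.isSome_iff_ne_none, Ne, PySem.List.pyGet?_eq_none_iff]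
  simp [PySem.Raise.InRange]
  omega

lemma pvCount_tp (zs : List (Int × Int)) : (zs.count ((1 : Int), (1 : Int)) : Int) = (zs.countP pvPTp : Int) := by
  congr 1
  rw [List.count_eq_countP]
  apply List.countP_congr
  rintro ⟨a, b⟩ _
  by_cases h1 : a = 1 <;> by_cases h2 : b = 1 <;> simp [pvPTp, h1, h2, Prod.ext_iff]

lemma pvCount_fp (zs : List (Int × Int)) :
    (zs.countP (fun k => k.2 == 0 && k.1 != 0) : Int) = (zs.countP pvPFp : Int) := by
  congr 1
  apply List.countP_congr
  rintro ⟨a, b⟩ _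
  by_cases h1 : a = b <;> by_cases h2 : b = 0 <;> simp [pvPFp, h1, h2]

lemma pvCount_fn (zs : List (Int × Int)) :
    (zs.countP (fun k => k.2 == 1 && k.1 != 1) : Int) = (zs.countP pvPFn : Int) := by
  congr 1
  apply List.countP_congr
  rintro ⟨a, b⟩ _
  by_cases h1 : a = b <;> by_cases h2 : b = 1 <;> simp [pvPFn, h1, h2]

-- ===== VERDICT (by name: the statement is the Claim_ definition above) =====
theorem score_attributions_spec : Claim_equal_score_attributions := by
  intro attr ex _ hpre
  unfold Spec_score_attributions
  have hsome : ∀ i ∈ PySem.List.pyRange 0 attr.length 1,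
      (PySem.List.pyGet? attr i).isSome ∧ (PySem.List.pyGet? ex.2.2.2.2 i).isSome := by
    intro i hi
    rw [PySem.List.mem_pyRange_one] at hi
    exact ⟨pvGetSome _ _ hi.1 hi.2, pvGetSome _ _ hi.1 (lt_of_lt_of_le hi.2 (by exact_mod_cast hpre))⟩
  simp only [score_attributions, score_attributions_alt]
  rw [pvLoopA_counts attr ex.2.2.2.2 _ _ hsome,
      pvBuildFreq_eq_counter attr ex.2.2.2.2 _ _ hsome,
      PySem.Dict.foldl_insert_getD_add_one_eq_counter,
      PySem.Dict.getD_counter, PySem.Dict.items_counter]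
  set zs := (PySem.List.pyRange 0 attr.length 1).map (pvPairAt attr ex.2.2.2.2) with hzs
  rw [List.filter_map, List.filter_map, List.map_map, List.map_map]
  simp only [Function.comp_def, Prod.mk.injEq]
  rw [pvSumCounts zs (fun k => k.2 == 0 && k.1 != 0), pvSumCounts zs (fun k => k.2 == 1 && k.1 != 1),
      pvCount_tp, pvCount_fp, pvCount_fn]
  refine ⟨by omega, by omega, by omega⟩
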